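-- pv_equiv track=rewrite | github.com/bowenwang77/OmniMol | graphormer/tasks/dft_md_combine.py | get_item_and_sublist_index
-- ===== SOURCE A (Python) =====
-- def get_item_and_sublist_index(list_of_lists, idx):
--     current_idx = 0
--     for i, sublist in enumerate(list_of_lists):
--         sublist_length = len(sublist)
--         if idx < current_idx + sublist_length:
--             return sublist[idx - current_idx], i
--         current_idx += sublist_length
--     return None, -1  # Return (None, -1) if the index is out of range
-- ===== SOURCE B (Python) =====
-- def get_item_and_sublist_index(list_of_lists, idx):
--     # build prefix-sum table of sublist lengths, then binary-search it
--     cum = []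
--     total = 0
--     for sub in list_of_lists:
--         total += len(sub)
--         cum.append(total)
--     # hand-rolled bisect_right: first lo with idx < cum[lo]
--     lo, hi = 0, len(cum)
--     while lo < hi:
--         mid = (lo + hi) // 2
--         if cum[mid] <= idx:
--             lo = mid + 1
--         else:
--             hi = mid
--     if lo == len(cum):
--         return None, -1
--     sub = list_of_lists[lo]
--     start = cum[lo] - len(sub)
--     return sub[idx - start], lo
-- ===== Notes on version B (the rewrite author's own statement) =====
-- stated objective: alternative
-- what changed: Replaces the linear scan that threads a running offset with a precomputed prefix-sum table of sublist lengths queried by a hand-rolled binary search (bisect_right).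
import Mathlib
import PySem

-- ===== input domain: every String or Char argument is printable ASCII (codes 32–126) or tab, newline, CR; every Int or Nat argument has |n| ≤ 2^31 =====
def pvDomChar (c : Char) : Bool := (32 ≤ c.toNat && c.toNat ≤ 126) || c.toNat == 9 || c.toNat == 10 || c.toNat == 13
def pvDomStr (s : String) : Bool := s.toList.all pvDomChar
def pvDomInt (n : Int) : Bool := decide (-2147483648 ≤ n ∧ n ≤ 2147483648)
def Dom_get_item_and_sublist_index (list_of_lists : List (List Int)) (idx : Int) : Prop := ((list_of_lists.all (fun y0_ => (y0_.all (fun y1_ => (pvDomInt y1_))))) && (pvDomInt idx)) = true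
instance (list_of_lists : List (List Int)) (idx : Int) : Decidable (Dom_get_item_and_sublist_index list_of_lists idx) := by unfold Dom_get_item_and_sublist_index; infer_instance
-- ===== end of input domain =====

-- B replaces A's offset-threading linear scan by a prefix-sum table queried with a
-- hand-rolled binary search (bisect_right); alternative decomposition, same exact values.


-- ===== PORT A =====
-- the enumerate-loop of A: state = (i, current_idx); pyGet? none = Python IndexError (outside Pre_)
def pvLoopA : List (List Int) → Int → Int → Int → Option Int × Int
  | [], _, _, _ => (none, -1)
  | sub :: rest, idx, i, cur =>
      if idx < cur + (sub.length : Int) then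
        (PySem.List.pyGet? sub (idx - cur), i)
      else
        pvLoopA rest idx (i + 1) (cur + (sub.length : Int))

def get_item_and_sublist_index (list_of_lists : List (List Int)) (idx : Int) : Option Int × Int :=
  pvLoopA list_of_lists idx 0 0

-- ===== PORT B =====
-- B's prefix-sum table: cum entry j = total + lengths of sublists 0..j
def pvCum : List (List Int) → Int → List Int
  | [], _ => []
  | sub :: rest, total =>
      let t := total + (sub.length : Int)
      t :: pvCum rest t

-- B's hand-rolled bisect_right loop
def pvBisect (cum : List Int) (idx : Int) (lo hi : Nat) : Nat :=
  if _h : lo < hi then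
    let mid := (lo + hi) / 2
    if cum.getD mid 0 ≤ idx then pvBisect cum idx (mid + 1) hi
    else pvBisect cum idx lo mid
  else lo
termination_by hi - lo
decreasing_by all_goals omega

def get_item_and_sublist_index_alt (list_of_lists : List (List Int)) (idx : Int) : Option Int × Int :=
  let cum := pvCum list_of_lists 0
  let lo := pvBisect cum idx 0 cum.length
  if lo = cum.length then (none, -1)
  else
    let sub := list_of_lists.getD lo []
    let start := cum.getD lo 0 - (sub.length : Int)
    (PySem.List.pyGet? sub (idx - start), (lo : Int))

-- ===== PRECONDITION & SPEC =====
-- Pre_ excludes exactly the inputs where Python A raises IndexError: a negative idx whose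
-- magnitude exceeds the length of the first sublist of a nonempty list_of_lists.
def Pre_get_item_and_sublist_index (list_of_lists : List (List Int)) (idx : Int) : Prop :=
  0 ≤ idx ∨ list_of_lists = [] ∨ -idx ≤ ((list_of_lists.headD []).length : Int)
instance (list_of_lists : List (List Int)) (idx : Int) : Decidable (Pre_get_item_and_sublist_index list_of_lists idx) := by unfold Pre_get_item_and_sublist_index; infer_instance
def pvWitness_get_item_and_sublist_index : List (List Int) × Int := ([[1, 2], [3]], 2)

def Spec_get_item_and_sublist_index (list_of_lists : List (List Int)) (idx : Int) (out : Option Int × Int) : Prop := out = get_item_and_sublist_index_alt list_of_lists idx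
instance (list_of_lists : List (List Int)) (idx : Int) (out : Option Int × Int) : Decidable (Spec_get_item_and_sublist_index list_of_lists idx out) := by unfold Spec_get_item_and_sublist_index; infer_instance

-- ===== CLAIM (what is proved, stated in full; the proofs are below) =====
def Claim_equal_get_item_and_sublist_index : Prop := ∀ (list_of_lists : List (List Int)) (idx : Int), Dom_get_item_and_sublist_index list_of_lists idx → Pre_get_item_and_sublist_index list_of_lists idx → Spec_get_item_and_sublist_index list_of_lists idx (get_item_and_sublist_index list_of_lists idx)

-- ===== LEMMAS AND PROOFS =====

theorem pvCum_length (L : List (List Int)) (t : Int) : (pvCum L t).length = L.length := by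
  induction L generalizing t with
  | nil => rfl
  | cons s r ih => simp [pvCum, ih]

theorem pvCum_ge (L : List (List Int)) (t : Int) :
    ∀ j : Nat, j < L.length → t ≤ (pvCum L t).getD j 0 := by
  induction L generalizing t with
  | nil => intro j hj; simp at hj
  | cons s r ih =>
      intro j hj
      cases j with
      | zero =>
          have hl : (0 : Int) ≤ (s.length : Int) := by positivity
          rw [show pvCum (s :: r) t = (t + (s.length : Int)) :: pvCum r (t + (s.length : Int)) from rfl,
            List.getD_cons_zero]
          omega
      | succ j =>
          have h := ih (t + (s.length : Int)) j (by simpa using hj)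
          have hl : (0 : Int) ≤ (s.length : Int) := by positivity
          rw [show pvCum (s :: r) t = (t + (s.length : Int)) :: pvCum r (t + (s.length : Int)) from rfl,
            List.getD_cons_succ]
          omega

theorem pvCum_mono (L : List (List Int)) (t : Int) :
    ∀ j k : Nat, j ≤ k → k < L.length →
      (pvCum L t).getD j 0 ≤ (pvCum L t).getD k 0 := by
  induction L generalizing t with
  | nil => intro j k _ hk; simp at hk
  | cons s r ih =>
      intro j k hjk hk
      cases j with
      | zero =>
          cases k with
          | zero => exact le_refl _
          | succ k =>
              have h1 : (t + (s.length : Int)) ≤ (pvCum r (t + (s.length : Int))).getD k 0 := by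
                have := pvCum_ge r (t + (s.length : Int)) k (by simpa using hk)
                exact this
              simpa [pvCum] using h1
      | succ j =>
          cases k with
          | zero => omega
          | succ k =>
              have := ih (t + (s.length : Int)) j k (by omega) (by simpa using hk)
              simpa [pvCum] using this

-- the bisect loop invariant: everything left of lo is ≤ idx, everything from hi on is > idx
theorem pvBisect_spec (cum : List Int) (idx : Int) :
    ∀ lo hi : Nat, lo ≤ hi → hi ≤ cum.length →
    (∀ j k : Nat, j ≤ k → k < cum.length → cum.getD j 0 ≤ cum.getD k 0) →
    (∀ j : Nat, j < lo → cum.getD j 0 ≤ idx) →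
    (∀ j : Nat, hi ≤ j → j < cum.length → idx < cum.getD j 0) →
    let r := pvBisect cum idx lo hi
    r ≤ cum.length ∧ (∀ j : Nat, j < r → cum.getD j 0 ≤ idx) ∧
      (r < cum.length → idx < cum.getD r 0) := by
  intro lo hi
  induction hn : hi - lo using Nat.strong_induction_on generalizing lo hi with
  | _ n ih =>
    intro hle hhi hmono hlow hhigh
    by_cases h : lo < hi
    · have hmid : (lo + hi) / 2 < hi := by omega
      have hmid2 : lo ≤ (lo + hi) / 2 := by omega
      rw [pvBisect]
      simp only [h, dif_pos]
      by_cases hc : cum.getD ((lo + hi) / 2) 0 ≤ idx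
      · rw [if_pos hc]
        exact ih (hi - ((lo + hi) / 2 + 1)) (by omega) ((lo + hi) / 2 + 1) hi rfl
          (by omega) hhi hmono
          (fun j hj => le_trans (hmono j ((lo + hi) / 2)
            (by omega) (by omega)) hc)
          hhigh
      · rw [if_neg hc]
        push_neg at hc
        exact ih (((lo + hi) / 2) - lo) (by omega) lo ((lo + hi) / 2) rfl
          hmid2 (by omega) hmono hlow
          (fun j hj1 hj2 => lt_of_lt_of_le hc (hmono ((lo + hi) / 2) j hj1 hj2))
    · rw [pvBisect]
      simp only [h, dif_neg, not_false_iff]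
      refine ⟨by omega, hlow, ?_⟩
      intro hr
      exact hhigh lo (by omega) hr

-- findIdx characterization of "first j with idx < cum[j]"
theorem findIdx_char (cum : List Int) (idx : Int) :
    let f := cum.findIdx (fun c => decide (idx < c))
    f ≤ cum.length ∧ (∀ j : Nat, j < f → cum.getD j 0 ≤ idx) ∧
      (f < cum.length → idx < cum.getD f 0) := by
  induction cum with
  | nil => simp
  | cons c r ih =>
      by_cases h : idx < c
      · simp [List.findIdx_cons, h]
      · have hd : decide (idx < c) = false := by simpa using h
        obtain ⟨h1, h2, h3⟩ := ih
        simp only [List.findIdx_cons, hd, cond_false]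
        refine ⟨by simpa using Nat.succ_le_succ h1, ?_, ?_⟩
        · intro j hj
          cases j with
          | zero => simpa using not_lt.mp h
          | succ j => simpa using h2 j (by omega)
        · intro hf
          have := h3 (by simpa using hf)
          simpa using this

theorem bisect_eq_findIdx (L : List (List Int)) (idx : Int) :
    pvBisect (pvCum L 0) idx 0 (pvCum L 0).length
      = (pvCum L 0).findIdx (fun c => decide (idx < c)) := by
  set cum := pvCum L 0 with hc
  have hmono : ∀ j k : Nat, j ≤ k → k < cum.length → cum.getD j 0 ≤ cum.getD k 0 := by
    intro j k hjk hk
    exact pvCum_mono L 0 j k hjk (by simpa [hc, pvCum_length] using hk)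
  obtain ⟨b1, b2, b3⟩ := pvBisect_spec cum idx 0 cum.length (Nat.zero_le _) le_rfl hmono
    (by omega) (by omega)
  obtain ⟨f1, f2, f3⟩ := findIdx_char cum idx
  set r := pvBisect cum idx 0 cum.length
  set f := cum.findIdx (fun c => decide (idx < c))
  rcases lt_trichotomy r f with h | h | h
  · have hlt : r < cum.length := by omega
    have := b3 hlt
    have := f2 r h
    omega
  · exact h
  · have hlt : f < cum.length := by omega
    have := f3 hlt
    have := b2 f h
    omega

-- A's loop computes the findIdx-formula (induction generalizing offset & counter)
theorem loopA_eq (L : List (List Int)) (idx : Int) :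
    ∀ (i cur : Int),
    pvLoopA L idx i cur =
      (let cum := pvCum L cur
       let f := cum.findIdx (fun c => decide (idx < c))
       if f = cum.length then (none, -1)
       else
         (PySem.List.pyGet? (L.getD f []) (idx - (cum.getD f 0 - ((L.getD f []).length : Int))),
          i + (f : Int))) := by
  induction L with
  | nil => intro i cur; simp [pvLoopA, pvCum]
  | cons s r ih =>
      intro i cur
      by_cases h : idx < cur + (s.length : Int)
      · have hd : decide (idx < cur + (s.length : Int)) = true := by simpa using h
        simp only [pvLoopA, if_pos h, pvCum, List.findIdx_cons, hd, cond_true]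
        simp
      · have hd : decide (idx < cur + (s.length : Int)) = false := by simpa using h
        simp only [pvLoopA, if_neg h]
        rw [ih (i + 1) (cur + (s.length : Int))]
        simp only [pvCum, List.findIdx_cons, hd, cond_false]
        set f' := (pvCum r (cur + (s.length : Int))).findIdx (fun c => decide (idx < c)) with hf'
        by_cases hf : f' = (pvCum r (cur + (s.length : Int))).length
        · simp [hf]
        · have hne : ¬ (f' + 1 = (pvCum r (cur + (s.length : Int))).length + 1) := by omega
          simp only [List.length_cons, hne, hf, List.getD_cons_succ, if_false]
          simp
          push_cast
          ring

-- ===== VERDICT (by name: the statement is the Claim_ definition above) =====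
theorem get_item_and_sublist_index_spec : Claim_equal_get_item_and_sublist_index := by
  intro L idx _ _
  unfold Spec_get_item_and_sublist_index get_item_and_sublist_index
  rw [loopA_eq L idx 0 0]
  simp only [get_item_and_sublist_index_alt, bisect_eq_findIdx]
  split_ifs with h
  · rfl
  · simp
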